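-- pv_equiv track=rewrite | github.com/DancingOnAir/LeetcodePythonSolution | String/1987_number_of_unique_good_subsequences.py | numberOfUniqueGoodSubsequences1
-- ===== SOURCE A (Python) =====
-- def numberOfUniqueGoodSubsequences1(binary: str) -> int:
--     zeros = ones = 0
--     mod = 10 ** 9 + 7
--     for i in binary:
--         if i == '1':
--             ones = (ones + zeros + 1) % mod
--         else:
--             zeros = (ones + zeros) % mod
--     return (ones + zeros + ('0' in binary)) % mod
-- ===== SOURCE B (Python) =====
-- def numberOfUniqueGoodSubsequences1(binary: str) -> int:
--     # Right-to-left scan counting distinct subsequences by their STARTING character: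
--     # f0 / f1 = number of distinct subsequences of the suffix seen so far that start
--     # with '0' / '1'.  Prepending d gives the singleton 'd' plus 'd' before any of them.
--     mod = 10 ** 9 + 7
--     f0, f1 = 0, 0
--     k = len(binary)
--     while k > 0:
--         k -= 1
--         if binary[k] == '1':
--             f1 = (1 + f0 + f1) % mod
--         else:
--             f0 = (1 + f0 + f1) % mod
--     return (f1 + ('0' in binary)) % mod
-- ===== Notes on version B (the rewrite author's own statement) =====
-- stated objective: alternative
-- what changed: B scans the string right-to-left (index walking down) maintaining counts of distinct subsequences classified by their STARTING character (both branches update with 1+f0+f1), instead of A's left-to-right fold classified by ENDING character; equivalence is a nontrivial conjugacy of the two affine recurrences.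
import Mathlib
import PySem

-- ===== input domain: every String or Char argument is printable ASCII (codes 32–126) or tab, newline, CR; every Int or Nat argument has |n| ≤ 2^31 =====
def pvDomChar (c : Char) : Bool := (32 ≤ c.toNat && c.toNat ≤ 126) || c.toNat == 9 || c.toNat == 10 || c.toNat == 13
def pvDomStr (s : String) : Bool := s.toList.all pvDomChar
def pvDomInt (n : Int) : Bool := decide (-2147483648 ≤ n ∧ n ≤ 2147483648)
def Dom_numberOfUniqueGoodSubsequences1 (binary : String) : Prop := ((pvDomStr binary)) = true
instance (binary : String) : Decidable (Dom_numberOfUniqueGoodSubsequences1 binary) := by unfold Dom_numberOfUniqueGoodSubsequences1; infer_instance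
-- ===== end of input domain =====

-- B counts distinct subsequences by STARTING character in a right-to-left scan instead of
-- A's by-ending-character left-to-right DP (objective: alternative, same O(n) cost).

-- ===== PORT A =====
-- A's loop body: state (zeros, ones); '1' updates ones, anything else updates zeros.
def goodStepA (st : Int × Int) (i : Char) : Int × Int :=
  if i = '1' then (st.1, (st.2 + st.1 + 1) % 1000000007)
  else ((st.2 + st.1) % 1000000007, st.2)

def numberOfUniqueGoodSubsequences1 (binary : String) : Int :=
  let st := binary.toList.foldl goodStepA (0, 0)
  -- `'0' in binary` ported as list membership (exact: substring test of a single char)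
  (st.2 + st.1 + (if '0' ∈ binary.toList then 1 else 0)) % 1000000007

-- ===== PORT B =====
-- B's while-loop walks the index down, so the character at the head of the list is the
-- LAST one processed: one recursion step = one loop iteration of Source B, state (f0, f1).
def altScan : List Char → Int × Int
  | [] => (0, 0)
  | c :: rest =>
      match altScan rest with
      | (f0, f1) =>
          if c = '1' then (f0, (1 + f0 + f1) % 1000000007)
          else ((1 + f0 + f1) % 1000000007, f1)

def numberOfUniqueGoodSubsequences1_alt (binary : String) : Int :=
  match altScan binary.toList with
  | (_, f1) => (f1 + (if binary.toList.contains '0' then 1 else 0)) % 1000000007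

-- ===== PRECONDITION & SPEC =====
def Spec_numberOfUniqueGoodSubsequences1 (binary : String) (out : Int) : Prop := out = numberOfUniqueGoodSubsequences1_alt binary
instance (binary : String) (out : Int) : Decidable (Spec_numberOfUniqueGoodSubsequences1 binary out) := by unfold Spec_numberOfUniqueGoodSubsequences1; infer_instance

-- ===== CLAIM =====
def Claim_equal_numberOfUniqueGoodSubsequences1 : Prop := ∀ (binary : String), Dom_numberOfUniqueGoodSubsequences1 binary → Spec_numberOfUniqueGoodSubsequences1 binary (numberOfUniqueGoodSubsequences1 binary)

-- ===== LEMMAS AND PROOFS =====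

-- Casting an Int reduced mod 1000000007 into ZMod 1000000007 forgets the reduction.
lemma castmod (a : Int) : ((a % 1000000007 : Int) : ZMod 1000000007) = (a : ZMod 1000000007) := by
  exact_mod_cast ZMod.intCast_mod a 1000000007

-- Two Ints congruent as casts into ZMod 1000000007 have equal `% 1000000007`.
lemma eq_mod_of_cast (a b : Int) (h : (a : ZMod 1000000007) = (b : ZMod 1000000007)) :
    a % 1000000007 = b % 1000000007 := by
  have := (ZMod.intCast_eq_intCast_iff a b 1000000007).mp h
  exact_mod_cast this

-- Conjugacy invariant linking A's forward fold (from an arbitrary start state (z, o))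
-- with B's backward recursion: Z + O ≡ f0*o + f1*(z+1) + z + o  (mod 1000000007).
lemma good_inv (t : List Char) : ∀ z o : Int,
    (((t.foldl goodStepA (z, o)).1 + (t.foldl goodStepA (z, o)).2 : Int) : ZMod 1000000007)
    = (((altScan t).1 * o + (altScan t).2 * (z + 1) + z + o : Int) : ZMod 1000000007) := by
  induction t with
  | nil => intro z o; simp only [List.foldl_nil, altScan]; push_cast; ring
  | cons c t ih =>
    intro z o
    simp only [List.foldl_cons, altScan]
    rcases h : altScan t with ⟨g0, g1⟩
    by_cases hc : c = '1'
    · simp only [goodStepA, hc, reduceIte]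
      have := ih z ((o + z + 1) % 1000000007)
      rw [h] at this
      rw [this]
      push_cast [castmod]
      ring
    · simp only [goodStepA, if_neg hc]
      have := ih ((o + z) % 1000000007) o
      rw [h] at this
      rw [this]
      push_cast [castmod]
      ring

-- ===== VERDICT =====
theorem numberOfUniqueGoodSubsequences1_spec : Claim_equal_numberOfUniqueGoodSubsequences1 := by
  intro binary _
  unfold Spec_numberOfUniqueGoodSubsequences1
  unfold numberOfUniqueGoodSubsequences1 numberOfUniqueGoodSubsequences1_alt
  rcases h : altScan binary.toList with ⟨g0, g1⟩
  have hinv := good_inv binary.toList 0 0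
  rw [h] at hinv
  simp only
  rw [show (if '0' ∈ binary.toList then (1:Int) else 0)
        = (if binary.toList.contains '0' then 1 else 0) from by
      by_cases hm : '0' ∈ binary.toList <;> simp [hm]]
  generalize (if binary.toList.contains '0' then (1:Int) else 0) = e
  apply eq_mod_of_cast
  push_cast at hinv ⊢
  rw [show ((binary.toList.foldl goodStepA ((0:Int),(0:Int))).2 : ZMod 1000000007)
        + (binary.toList.foldl goodStepA ((0:Int),(0:Int))).1 + e
      = (((binary.toList.foldl goodStepA ((0:Int),(0:Int))).1 : ZMod 1000000007)
        + (binary.toList.foldl goodStepA ((0:Int),(0:Int))).2) + e from by ring, hinv]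
  ring
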